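-- pv_equiv track=rewrite | github.com/creep1g/adventofCode | dec4/day4.py | data_to_list
-- ===== SOURCE A (Python) =====
-- def data_to_list(data):
--     data_list = []
--     temp_list = []
--     for line in data:
--         if line.split() != []:
--             for j in line.split():
--                 temp_list.append(j)
--         else:
--             data_list.append(temp_list)
--             temp_list = []
--     return data_list
-- ===== SOURCE B (Python) =====
-- def data_to_list(data):
--     # Recursive decomposition: split off the group before the first blank line,
--     # recurse on the remainder; the tail after the last blank is never emitted.
--     data = list(data)
--     for i, line in enumerate(data):
--         if not line.split():
--             head = [tok for l in data[:i] for tok in l.split()]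
--             return [head] + data_to_list(data[i + 1:])
--     return []
-- ===== Notes on version B (the rewrite author's own statement) =====
-- stated objective: alternative
-- what changed: Replaces the single-pass accumulator loop with a recursive decomposition that finds the first blank line, emits the flattened tokens of the prefix before it, and recurses on the suffix after it (the tail after the last blank is naturally never emitted).
import Mathlib
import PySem

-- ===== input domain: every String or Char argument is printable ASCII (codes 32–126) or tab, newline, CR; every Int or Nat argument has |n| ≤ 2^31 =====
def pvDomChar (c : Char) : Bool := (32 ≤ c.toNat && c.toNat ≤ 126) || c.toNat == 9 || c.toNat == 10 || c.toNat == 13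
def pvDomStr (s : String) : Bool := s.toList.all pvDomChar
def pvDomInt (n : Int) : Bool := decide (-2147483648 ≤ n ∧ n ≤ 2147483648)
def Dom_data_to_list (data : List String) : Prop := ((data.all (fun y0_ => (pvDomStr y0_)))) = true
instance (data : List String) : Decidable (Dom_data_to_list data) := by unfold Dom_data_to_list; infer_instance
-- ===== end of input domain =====

-- B replaces A's accumulator loop with a recursive split at the first blank line; same value, same cost.

-- ===== PORT A =====
-- the for-loop with state (data_list, temp_list), step for step
def data_to_list (data : List String) : List (List String) :=
  (data.foldl
    (fun (st : List (List String) × List String) line =>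
      if PySem.Str.split₀ line ≠ [] then
        (st.1, st.2 ++ PySem.Str.split₀ line)
      else
        (st.1 ++ [st.2], []))
    ([], [])).1

-- ===== PORT B =====
-- recursive: group before the first blank line, recurse on the suffix after it
def data_to_list_alt (data : List String) : List (List String) :=
  match h : data.findIdx? (fun l => PySem.Str.split₀ l == []) with
  | none => []
  | some i =>
      ((data.take i).flatMap (fun l => PySem.Str.split₀ l))
        :: data_to_list_alt (data.drop (i + 1))
termination_by data.length
decreasing_by
  have hi := List.findIdx?_eq_some_iff_findIdx_eq.mp h
  simp [List.length_drop]
  omega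

-- ===== PRECONDITION & SPEC =====
def Spec_data_to_list (data : List String) (out : List (List String)) : Prop := out = data_to_list_alt data
instance (data : List String) (out : List (List String)) : Decidable (Spec_data_to_list data out) := by unfold Spec_data_to_list; infer_instance

-- ===== CLAIM (what is proved, stated in full; the proofs are below) =====
def Claim_equal_data_to_list : Prop := ∀ (data : List String), Dom_data_to_list data → Spec_data_to_list data (data_to_list data)

-- ===== LEMMAS AND PROOFS =====

-- the key invariant: A's fold with state (dl, tl) = dl ++ (B with tl prepended to the first group)
theorem data_to_list_fold_eq (data : List String) :
    ∀ (dl : List (List String)) (tl : List String),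
      (data.foldl
        (fun (st : List (List String) × List String) line =>
          if PySem.Str.split₀ line ≠ [] then
            (st.1, st.2 ++ PySem.Str.split₀ line)
          else
            (st.1 ++ [st.2], []))
        (dl, tl)).1
      = dl ++ (match data.findIdx? (fun l => PySem.Str.split₀ l == []) with
        | none => []
        | some i =>
            (tl ++ (data.take i).flatMap (fun l => PySem.Str.split₀ l))
              :: data_to_list_alt (data.drop (i + 1))) := by
  induction data with
  | nil => simp
  | cons l rest ih =>
    intro dl tl
    rw [List.foldl_cons]
    by_cases hl : PySem.Str.split₀ l = []
    · -- blank line: flush tl; findIdx? = some 0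
      rw [if_neg (by simp [hl])]
      rw [ih (dl ++ [tl]) []]
      rw [List.findIdx?_cons]
      simp only [hl, beq_self_eq_true, if_true, List.take_zero, List.flatMap_nil,
        List.append_nil, List.drop_succ_cons, List.drop_zero, List.nil_append]
      rw [List.append_assoc]
      congr 1
      rw [List.singleton_append]
      congr 1
      rw [data_to_list_alt]
      cases hr : rest.findIdx? (fun l => PySem.Str.split₀ l == []) <;> simp
    · -- non-blank: tokens appended to tl
      simp only [hl, ne_eq, not_false_eq_true, if_true]
      rw [ih dl (tl ++ PySem.Str.split₀ l)]
      congr 1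
      rw [List.findIdx?_cons]
      simp only [beq_iff_eq, hl, if_false]
      cases hr : rest.findIdx? (fun l => PySem.Str.split₀ l == []) with
      | none => simp
      | some i =>
        simp only [Option.map_some, List.take_succ_cons, List.flatMap_cons,
          List.drop_succ_cons, List.append_assoc]

-- ===== VERDICT (by name: the statement is the Claim_ definition above) =====
theorem data_to_list_spec : Claim_equal_data_to_list := by
  intro data _
  unfold Spec_data_to_list data_to_list
  rw [data_to_list_fold_eq data [] []]
  conv_rhs => rw [data_to_list_alt]
  cases h : data.findIdx? (fun l => PySem.Str.split₀ l == []) <;> simp
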